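-- pv_equiv track=rewrite | github.com/sobota69/fraudd | src/graph/provider.py | _compute_usual_activity_window
-- ===== SOURCE A (Python) =====
-- def _compute_usual_activity_window(
--     histogram: dict[int, int],
--     window_hours: int = 6,
-- ) -> tuple[int, int]:
--     """
--     Compute the densest rolling window over 24 hours.
--     Returns (start_hour, end_hour), inclusive.
--     """
--     if window_hours <= 0 or window_hours > 24:
--         raise ValueError("window_hours must be between 1 and 24")
--
--     counts = [int(histogram.get(h, 0)) for h in range(24)]
--
--     best_start = 0
--     best_total = -1
--
--     for start in range(24):
--         total = 0
--         for offset in range(window_hours):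
--             total += counts[(start + offset) % 24]
--         if total > best_total:
--             best_total = total
--             best_start = start
--
--     best_end = (best_start + window_hours - 1) % 24
--     return best_start, best_end
-- ===== SOURCE B (Python) =====
-- def _compute_usual_activity_window(
--     histogram: dict[int, int],
--     window_hours: int = 6,
-- ) -> tuple[int, int]:
--     """Densest rolling window via an O(24 + window) sliding-window sum."""
--     if window_hours <= 0 or window_hours > 24:
--         raise ValueError("window_hours must be between 1 and 24")
--
--     counts = [int(histogram.get(h, 0)) for h in range(24)]
--
--     total = 0
--     for o in range(window_hours):
--         total += counts[o % 24]
--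
--     best_start = 0
--     best_total = -1
--     if total > best_total:
--         best_start, best_total = 0, total
--
--     for start in range(1, 24):
--         total += counts[(start - 1 + window_hours) % 24] - counts[start - 1]
--         if total > best_total:
--             best_start, best_total = start, total
--
--     return best_start, (best_start + window_hours - 1) % 24
-- ===== Notes on version B (the rewrite author's own statement) =====
-- stated objective: alternative
-- what changed: Replaces the nested O(24*window) brute-force window sums with a single O(24+window) sliding-window pass that updates the running total by subtracting the hour leaving the window and adding the hour entering it.
import Mathlib
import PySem

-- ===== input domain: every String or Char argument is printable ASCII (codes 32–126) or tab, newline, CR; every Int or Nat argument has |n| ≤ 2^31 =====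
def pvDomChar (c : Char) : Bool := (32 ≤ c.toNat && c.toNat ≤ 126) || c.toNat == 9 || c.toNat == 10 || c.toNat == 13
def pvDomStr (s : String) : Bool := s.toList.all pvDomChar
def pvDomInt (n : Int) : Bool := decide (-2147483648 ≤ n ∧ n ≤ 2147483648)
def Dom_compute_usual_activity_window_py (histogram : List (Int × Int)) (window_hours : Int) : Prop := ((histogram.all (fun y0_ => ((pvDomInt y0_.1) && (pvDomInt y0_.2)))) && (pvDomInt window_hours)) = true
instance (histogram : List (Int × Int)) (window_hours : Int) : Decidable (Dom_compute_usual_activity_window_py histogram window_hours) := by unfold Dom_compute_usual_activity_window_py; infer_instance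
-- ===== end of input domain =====

-- B replaces A's nested brute-force window sums with a single sliding-window pass
-- (alternative algorithm; same results, return value only — neither mutates its input).

-- ===== PORT A =====
def compute_usual_activity_window_py (histogram : List (Int × Int)) (window_hours : Int) : Int × Int :=
  -- counts = [int(histogram.get(h, 0)) for h in range(24)]
  let counts := (PySem.List.pyRange 0 24 1).map (fun h => PySem.Dict.getD (PySem.Dict.mk histogram) h 0)
  -- for start in range(24): total = sum over offsets; keep strictly better totals
  let r := (PySem.List.pyRange 0 24 1).foldl (fun (acc : Int × Int) start =>
      let total := (PySem.List.pyRange 0 window_hours 1).foldl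
        (fun t offset => t + PySem.List.pyGetD counts (PySem.Int.mod (start + offset) 24) 0) 0
      if total > acc.2 then (start, total) else acc) (0, -1)
  (r.1, PySem.Int.mod (r.1 + window_hours - 1) 24)

-- ===== PORT B =====
def compute_usual_activity_window_py_alt (histogram : List (Int × Int)) (window_hours : Int) : Int × Int :=
  let counts := (PySem.List.pyRange 0 24 1).map (fun h => PySem.Dict.getD (PySem.Dict.mk histogram) h 0)
  -- total = sum(counts[o % 24] for o in range(window_hours))
  let total0 := (PySem.List.pyRange 0 window_hours 1).foldl
      (fun t o => t + PySem.List.pyGetD counts (PySem.Int.mod o 24) 0) 0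
  -- best_start, best_total = 0, -1; if total > best_total: take start 0
  let st0 : Int × Int × Int := if total0 > (-1 : Int) then (0, total0, total0) else (0, -1, total0)
  -- for start in range(1, 24): slide the window, keep strictly better totals
  let r := (PySem.List.pyRange 1 24 1).foldl (fun (s : Int × Int × Int) start =>
      let t := s.2.2 + PySem.List.pyGetD counts (PySem.Int.mod (start - 1 + window_hours) 24) 0
                     - PySem.List.pyGetD counts (start - 1) 0
      if t > s.2.1 then (start, t, t) else (s.1, s.2.1, t)) st0
  (r.1, PySem.Int.mod (r.1 + window_hours - 1) 24)

-- ===== PRECONDITION & SPEC =====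
-- Pre_ excludes exactly the inputs where A raises ValueError (window_hours ≤ 0 or > 24).
def Pre_compute_usual_activity_window_py (histogram : List (Int × Int)) (window_hours : Int) : Prop :=
  1 ≤ window_hours ∧ window_hours ≤ 24
instance (histogram : List (Int × Int)) (window_hours : Int) : Decidable (Pre_compute_usual_activity_window_py histogram window_hours) := by unfold Pre_compute_usual_activity_window_py; infer_instance
def pvWitness_compute_usual_activity_window_py : (List (Int × Int)) × Int := ([(8, 5), (9, 7), (20, 2)], 6)

def Spec_compute_usual_activity_window_py (histogram : List (Int × Int)) (window_hours : Int) (out : Int × Int) : Prop := out = compute_usual_activity_window_py_alt histogram window_hours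
instance (histogram : List (Int × Int)) (window_hours : Int) (out : Int × Int) : Decidable (Spec_compute_usual_activity_window_py histogram window_hours out) := by unfold Spec_compute_usual_activity_window_py; infer_instance

-- ===== CLAIM (what is proved, stated in full; the proofs are below) =====
def Claim_equal_compute_usual_activity_window_py : Prop := ∀ (histogram : List (Int × Int)) (window_hours : Int), Dom_compute_usual_activity_window_py histogram window_hours → Pre_compute_usual_activity_window_py histogram window_hours → Spec_compute_usual_activity_window_py histogram window_hours (compute_usual_activity_window_py histogram window_hours)

-- ===== LEMMAS AND PROOFS =====

-- hour count looked up cyclically (as both ports do, with Python's mod)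
def pvC (c : List Int) (i : Int) : Int := PySem.List.pyGetD c (PySem.Int.mod i 24) 0

-- A's window total for a given start, exactly A's inner loop
def pvTot (c : List Int) (w s : Int) : Int :=
  (PySem.List.pyRange 0 w 1).foldl (fun t o => t + pvC c (s + o)) 0

theorem pv_foldl_add_map (f : Int → Int) (l : List Int) (init : Int) :
    l.foldl (fun t o => t + f o) init = init + (l.map f).sum := by
  induction l generalizing init with
  | nil => simp
  | cons a l ih => simp [List.foldl, ih, add_assoc]

theorem pvTot_eq_sum_range (c : List Int) (w s : Int) :
    pvTot c w s = ((List.range w.toNat).map (fun k : Nat => pvC c (s + (k : Int)))).sum := by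
  unfold pvTot
  rw [pv_foldl_add_map, PySem.List.pyRange_one, List.map_map, sub_zero, zero_add]
  simp [Function.comp_def]

theorem pv_slideN (c : List Int) (s : Int) : ∀ n : Nat,
    ((List.range n).map (fun k : Nat => pvC c (s + 1 + (k : Int)))).sum
      = ((List.range n).map (fun k : Nat => pvC c (s + (k : Int)))).sum + pvC c (s + n) - pvC c s := by
  intro n
  induction n with
  | zero => simp
  | succ m ih =>
    rw [List.range_succ]
    simp only [List.map_append, List.sum_append, List.map_cons, List.map_nil,
      List.sum_cons, List.sum_nil]
    rw [ih]
    have h1 : s + 1 + (m : Int) = s + ((m : Int) + 1) := by ring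
    push_cast
    rw [h1]
    ring

theorem pv_slide (c : List Int) (w s : Int) (hw : 0 ≤ w) :
    pvTot c w (s + 1) = pvTot c w s + pvC c (s + w) - pvC c s := by
  rw [pvTot_eq_sum_range, pvTot_eq_sum_range, pv_slideN]
  have h : ((w.toNat : Nat) : Int) = w := by omega
  rw [h]

-- the two loop bodies, as closed functions of the shared counts list and window
def pvStepA (c : List Int) (w : Int) (acc : Int × Int) (start : Int) : Int × Int :=
  if pvTot c w start > acc.2 then (start, pvTot c w start) else acc

def pvStepB (c : List Int) (w : Int) (s : Int × Int × Int) (start : Int) : Int × Int × Int :=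
  let t := s.2.2 + PySem.List.pyGetD c (PySem.Int.mod (start - 1 + w) 24) 0
                 - PySem.List.pyGetD c (start - 1) 0
  if t > s.2.1 then (start, t, t) else (s.1, s.2.1, t)

theorem pv_main (c : List Int) (w : Int) (hw : 0 ≤ w) :
    ∀ (n : Nat) (s b t : Int), s + n = 24 → 1 ≤ s →
    (((PySem.List.pyRange s 24 1).foldl (pvStepB c w) (b, t, pvTot c w (s - 1))).1,
     ((PySem.List.pyRange s 24 1).foldl (pvStepB c w) (b, t, pvTot c w (s - 1))).2.1) =
    (PySem.List.pyRange s 24 1).foldl (pvStepA c w) (b, t) := by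
  intro n
  induction n with
  | zero =>
    intro s b t hs _
    have h24 : s = 24 := by omega
    subst h24
    rw [PySem.List.pyRange_one_eq_nil (by omega)]
    simp [List.foldl]
  | succ m ih =>
    intro s b t hs hs1
    have hlt : s < 24 := by omega
    rw [PySem.List.pyRange_one_cons hlt]
    simp only [List.foldl]
    have hmod : PySem.Int.mod (s - 1) 24 = s - 1 := by
      rw [PySem.Int.mod_eq_emod_of_pos (by omega), Int.emod_eq_of_lt (by omega) (by omega)]
    have ht' : pvTot c w (s - 1) + PySem.List.pyGetD c (PySem.Int.mod (s - 1 + w) 24) 0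
                 - PySem.List.pyGetD c (s - 1) 0 = pvTot c w s := by
      have hsl := pv_slide c w (s - 1) hw
      rw [sub_add_cancel] at hsl
      rw [hsl]
      unfold pvC
      rw [hmod]
    have hstep : pvStepB c w (b, t, pvTot c w (s - 1)) s =
        ((pvStepA c w (b, t) s).1, (pvStepA c w (b, t) s).2, pvTot c w (s + 1 - 1)) := by
      unfold pvStepB pvStepA
      simp only [add_sub_cancel_right]
      rw [ht']
      by_cases h : pvTot c w s > t
      · simp [h]
      · simp [h]
    rw [hstep]
    have hrec := ih (s + 1) (pvStepA c w (b, t) s).1 (pvStepA c w (b, t) s).2 (by omega) (by omega)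
    simpa using hrec

-- ===== VERDICT (by name: the statement is the Claim_ definition above) =====
theorem compute_usual_activity_window_py_spec : Claim_equal_compute_usual_activity_window_py := by
  intro histogram w _hdom hpre
  obtain ⟨hw1, hw24⟩ := hpre
  unfold Spec_compute_usual_activity_window_py
  simp only [compute_usual_activity_window_py, compute_usual_activity_window_py_alt]
  set c := (PySem.List.pyRange 0 24 1).map (fun h => PySem.Dict.getD (PySem.Dict.mk histogram) h 0) with hc
  have hfunA : (fun (acc : Int × Int) (start : Int) =>
      if (PySem.List.pyRange 0 w 1).foldl
          (fun t offset => t + PySem.List.pyGetD c (PySem.Int.mod (start + offset) 24) 0) 0 > acc.2 then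
        (start, (PySem.List.pyRange 0 w 1).foldl
          (fun t offset => t + PySem.List.pyGetD c (PySem.Int.mod (start + offset) 24) 0) 0)
      else acc) = pvStepA c w := by
    funext acc start
    simp only [pvStepA, pvTot, pvC]
  have hfunB : (fun (s : Int × Int × Int) (start : Int) =>
      if s.2.2 + PySem.List.pyGetD c (PySem.Int.mod (start - 1 + w) 24) 0
           - PySem.List.pyGetD c (start - 1) 0 > s.2.1 then
        (start, s.2.2 + PySem.List.pyGetD c (PySem.Int.mod (start - 1 + w) 24) 0
           - PySem.List.pyGetD c (start - 1) 0,
         s.2.2 + PySem.List.pyGetD c (PySem.Int.mod (start - 1 + w) 24) 0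
           - PySem.List.pyGetD c (start - 1) 0)
      else (s.1, s.2.1, s.2.2 + PySem.List.pyGetD c (PySem.Int.mod (start - 1 + w) 24) 0
           - PySem.List.pyGetD c (start - 1) 0)) = pvStepB c w := by
    funext s start
    simp only [pvStepB]
  have htot0 : (PySem.List.pyRange 0 w 1).foldl
      (fun t o => t + PySem.List.pyGetD c (PySem.Int.mod o 24) 0) 0 = pvTot c w 0 := by
    simp only [pvTot, pvC]
    congr 1
    funext t o
    rw [zero_add]
  rw [hfunA, hfunB, htot0]
  rw [PySem.List.pyRange_one_cons (show (0:Int) < 24 by norm_num)]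
  simp only [List.foldl_cons, zero_add]
  rcases hp : pvStepA c w (0, -1) 0 with ⟨b, t⟩
  have hst0 : (if pvTot c w 0 > (-1 : Int) then ((0 : Int), pvTot c w 0, pvTot c w 0)
      else ((0 : Int), -1, pvTot c w 0)) = (b, t, pvTot c w (1 - 1)) := by
    unfold pvStepA at hp
    split_ifs at hp ⊢ with h
    · rw [Prod.mk.injEq] at hp
      obtain ⟨hb, ht⟩ := hp
      subst hb; subst ht
      norm_num
    · rw [Prod.mk.injEq] at hp
      obtain ⟨hb, ht⟩ := hp
      subst hb; subst ht
      norm_num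
  rw [hst0]
  have hmain := pv_main c w (by omega) 23 1 b t (by omega) (by omega)
  rw [← hmain]
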